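-- pv_equiv track=rewrite | github.com/ccneverfail/satellites_topology_planning | topo/graph_utils.py | remove_E_core_graph
-- ===== SOURCE A (Python) =====
-- from typing import List, Dict, Tuple, Set
--
-- def remove_E_core_graph(E_core:Set[Tuple[int,int]],
--                         E_t:Set[Tuple[int,int]]):
--     E_interlayer=set(E_t)
--     def remove(u,v):
--         if u==v: return
--         if u>v: u,v=v,u
--         if (u,v)  not in E_interlayer: return
--         E_interlayer.remove((u,v))
--     for (u,v) in E_core: remove(u,v)
--     return E_interlayer
-- ===== SOURCE B (Python) =====
-- def remove_E_core_graph(E_core, E_t):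
--     return {e for e in E_t
--             if not any(a != b and (min(a, b), max(a, b)) == e for (a, b) in E_core)}
-- ===== Notes on version B (the rewrite author's own statement) =====
-- stated objective: alternative
-- what changed: B flips the traversal: instead of copying E_t and deleting each normalized core edge from the set, it makes one comprehension pass over E_t keeping an edge unless an inner linear scan of E_core finds a non-self-loop core edge whose sorted endpoints equal it; no removal set is built and nothing is mutated.
import Mathlib
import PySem

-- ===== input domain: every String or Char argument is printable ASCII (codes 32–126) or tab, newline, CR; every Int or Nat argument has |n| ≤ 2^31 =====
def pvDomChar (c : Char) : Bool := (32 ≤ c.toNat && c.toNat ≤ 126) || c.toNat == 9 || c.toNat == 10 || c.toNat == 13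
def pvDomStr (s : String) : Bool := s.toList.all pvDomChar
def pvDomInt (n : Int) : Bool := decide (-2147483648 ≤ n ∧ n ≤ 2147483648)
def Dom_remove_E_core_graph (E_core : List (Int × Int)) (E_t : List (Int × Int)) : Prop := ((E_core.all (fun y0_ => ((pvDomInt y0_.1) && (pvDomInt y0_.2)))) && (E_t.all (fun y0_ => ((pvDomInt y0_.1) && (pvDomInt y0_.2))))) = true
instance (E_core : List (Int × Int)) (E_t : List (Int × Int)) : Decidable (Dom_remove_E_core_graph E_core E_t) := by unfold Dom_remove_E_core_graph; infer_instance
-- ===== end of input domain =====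

-- B flips the traversal: one filtering pass over E_t with an inner linear scan of E_core
-- per edge, instead of A's copy-then-delete loop over E_core (objective: alternative).


-- ===== PORT A =====
-- literal port of A: copy set(E_t), then for each (u,v) in E_core run remove(u,v)
-- (Python's nested `remove` helper; `.remove` on an element known present = Set.discard)
def pvRemoveA (s : PySem.Set (Int × Int)) (e : Int × Int) : PySem.Set (Int × Int) :=
  if e.1 = e.2 then s
  else
    let p := if e.1 > e.2 then (e.2, e.1) else e
    if ¬ (PySem.Set.contains s p = true) then s
    else PySem.Set.discard s p

def remove_E_core_graph (E_core : List (Int × Int)) (E_t : List (Int × Int)) : List (Int × Int) :=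
  E_core.foldl pvRemoveA (PySem.Set.ofList E_t)

-- ===== PORT B =====
-- literal port of B: {e for e in E_t if not any(a != b and (min(a,b),max(a,b)) == e for (a,b) in E_core)}
def pvHit (E_core : List (Int × Int)) (e : Int × Int) : Bool :=
  E_core.any (fun c => decide (c.1 ≠ c.2) && decide ((min c.1 c.2, max c.1 c.2) = e))

def remove_E_core_graph_alt (E_core : List (Int × Int)) (E_t : List (Int × Int)) : List (Int × Int) :=
  PySem.Set.ofList (E_t.filter (fun e => !pvHit E_core e))

-- ===== PRECONDITION & SPEC =====
def Spec_remove_E_core_graph (E_core : List (Int × Int)) (E_t : List (Int × Int)) (out : List (Int × Int)) : Prop := out = remove_E_core_graph_alt E_core E_t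
instance (E_core : List (Int × Int)) (E_t : List (Int × Int)) (out : List (Int × Int)) : Decidable (Spec_remove_E_core_graph E_core E_t out) := by unfold Spec_remove_E_core_graph; infer_instance

-- ===== CLAIM =====
def Claim_equal_remove_E_core_graph : Prop := ∀ (E_core : List (Int × Int)) (E_t : List (Int × Int)), Dom_remove_E_core_graph E_core E_t → Spec_remove_E_core_graph E_core E_t (remove_E_core_graph E_core E_t)

-- ===== LEMMAS AND PROOFS =====

-- the list of normalized non-loop edges of l (A's normalization)
def pvRem (l : List (Int × Int)) : List (Int × Int) :=
  (l.filter (fun e => decide (e.1 ≠ e.2))).map (fun e => if e.1 > e.2 then (e.2, e.1) else e)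

theorem pvRem_cons (e : Int × Int) (l : List (Int × Int)) :
    pvRem (e :: l) = if e.1 = e.2 then pvRem l
      else (if e.1 > e.2 then (e.2, e.1) else e) :: pvRem l := by
  by_cases h : e.1 = e.2 <;> simp [pvRem, h]

-- one step of A's loop is a filter (absent p: filter removes nothing)
theorem pvRemoveA_eq_filter (s : List (Int × Int)) (e : Int × Int) :
    pvRemoveA s e = if e.1 = e.2 then s
      else s.filter (fun y => !y == (if e.1 > e.2 then (e.2, e.1) else e)) := by
  unfold pvRemoveA
  by_cases h : e.1 = e.2
  · simp [h]
  · simp only [if_neg h]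
    set p := if e.1 > e.2 then (e.2, e.1) else e with hp
    by_cases hc : PySem.Set.contains s p = true
    · rw [if_neg (not_not_intro hc), PySem.Set.discard]
    · have hnm : p ∉ s := by simpa [PySem.Set.contains, List.contains_iff_mem] using hc
      rw [if_pos hc]
      refine (List.filter_eq_self.mpr ?_).symm
      intro y hy
      have hne : y ≠ p := fun he => hnm (he ▸ hy)
      simpa using hne

-- A's whole fold removes exactly the elements listed in pvRem
theorem foldA_eq_filter (l : List (Int × Int)) (s : List (Int × Int)) :
    l.foldl pvRemoveA s = s.filter (fun x => !(pvRem l).contains x) := by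
  induction l generalizing s with
  | nil => simp [pvRem]
  | cons e l ih =>
    rw [List.foldl_cons, ih, pvRemoveA_eq_filter, pvRem_cons]
    by_cases h : e.1 = e.2
    · simp [h]
    · simp only [if_neg h]
      rw [List.filter_filter]
      apply List.filter_congr
      intro x _
      simp [Bool.and_comm, beq_eq_decide]

-- B's per-edge scan decides membership in A's removal list
theorem pvHit_eq_contains (l : List (Int × Int)) (e : Int × Int) :
    pvHit l e = (pvRem l).contains e := by
  induction l with
  | nil => simp [pvHit, pvRem]
  | cons c l ih =>
    rw [pvRem_cons]
    by_cases h : c.1 = c.2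
    · simp [pvHit, h] at ih ⊢; exact ih
    · have hmm : (min c.1 c.2, max c.1 c.2) = (if c.1 > c.2 then (c.2, c.1) else c) := by
        by_cases hlt : c.1 > c.2
        · simp [hlt, min_eq_right (le_of_lt hlt), max_eq_left (le_of_lt hlt)]
        · have hle : c.1 ≤ c.2 := not_lt.mp hlt
          simp [hlt, min_eq_left hle, max_eq_right hle]
      simp only [pvHit, List.any_cons] at ih ⊢
      rw [ih, hmm]
      simp [h, eq_comm]

-- building a set from a filtered list = filtering the set built from the list
theorem foldl_add_filter (p : (Int × Int) → Bool) (l acc : List (Int × Int)) :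
    (l.filter p).foldl PySem.Set.add (acc.filter p) = (l.foldl PySem.Set.add acc).filter p := by
  induction l generalizing acc with
  | nil => simp
  | cons a l ih =>
    by_cases hp : p a = true
    · have hadd : PySem.Set.add (acc.filter p) a = (PySem.Set.add acc a).filter p := by
        simp only [PySem.Set.add, PySem.Set.contains]
        by_cases hm : a ∈ acc
        · simp [hm, List.mem_filter, hp]
        · simp [hm, List.mem_filter, List.filter_append, hp]
      rw [List.filter_cons_of_pos hp, List.foldl_cons, hadd, ih, List.foldl_cons]
    · have hadd : (PySem.Set.add acc a).filter p = acc.filter p := by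
        simp only [PySem.Set.add, PySem.Set.contains]
        by_cases hm : a ∈ acc
        · simp [hm]
        · simp [hm, List.filter_append, hp]
      simp only [List.filter_cons, hp, if_neg Bool.false_ne_true, List.foldl_cons, ← hadd, ih]

theorem ofList_filter (p : (Int × Int) → Bool) (l : List (Int × Int)) :
    PySem.Set.ofList (l.filter p) = (PySem.Set.ofList l).filter p := by
  have h := foldl_add_filter p l []
  simpa [PySem.Set.ofList_eq_foldl] using h

-- ===== VERDICT =====
theorem remove_E_core_graph_spec : Claim_equal_remove_E_core_graph := by
  intro E_core E_t _
  unfold Spec_remove_E_core_graph remove_E_core_graph remove_E_core_graph_alt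
  rw [foldA_eq_filter, ofList_filter]
  apply List.filter_congr
  intro x _
  rw [pvHit_eq_contains]
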